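-- pv_equiv track=rewrite | github.com/ljishen/pyben-nio | src/client.py | __allot_size
-- ===== SOURCE A (Python) =====
-- def __allot_size(size, num):
--     i_size = size // num
--     left = size - i_size * num
--
--     p_sizes = []
--     for i in range(num):
--         p_sizes.append(i_size)
--         if i < left:
--             p_sizes[i] += 1
--
--     return p_sizes
-- ===== SOURCE B (Python) =====
-- def __allot_size(size, num):
--     # Greedy: repeatedly peel off the ceiling of remaining/slots-left.
--     p_sizes = []
--     remaining = size
--     for k in range(num, 0, -1):
--         part = -(-remaining // k)
--         p_sizes.append(part)
--         remaining -= part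
--     return p_sizes
-- ===== Notes on version B (the rewrite author's own statement) =====
-- stated objective: alternative
-- what changed: Replaces A's precomputed quotient/remainder with conditional +1 per slot by a greedy scheme: for each remaining slot count k it peels off ceil(remaining/k) and subtracts it from the running remainder; no 'left' remainder or per-index comparison exists in B.
import Mathlib
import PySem

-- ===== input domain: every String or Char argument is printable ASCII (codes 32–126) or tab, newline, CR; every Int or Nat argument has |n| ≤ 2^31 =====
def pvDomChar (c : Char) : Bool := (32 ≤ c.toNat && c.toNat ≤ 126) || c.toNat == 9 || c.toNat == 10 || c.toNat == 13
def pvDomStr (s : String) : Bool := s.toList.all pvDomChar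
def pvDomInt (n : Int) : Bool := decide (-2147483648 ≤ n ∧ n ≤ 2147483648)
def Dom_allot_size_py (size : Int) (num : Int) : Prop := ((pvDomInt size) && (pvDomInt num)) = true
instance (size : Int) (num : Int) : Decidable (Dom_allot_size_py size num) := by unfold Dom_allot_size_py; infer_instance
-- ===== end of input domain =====

-- B replaces A's quotient/remainder-with-conditional-increment loop by a greedy scheme that peels
-- off the ceiling of remaining/slots-left at each step (alternative algorithm; same cost).

-- ===== PORT A =====
-- loop body: p_sizes.append(i_size); if i < left: p_sizes[i] += 1
-- i ranges over range(num), so 0 ≤ i and i < len(p_sizes) at the read/write: pyGetD (in-range, default never used)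
-- and List.set with i.toNat (exact, i ≥ 0) are exact here.
def allot_size_py (size : Int) (num : Int) : List Int :=
  let i_size := PySem.Int.floordiv size num
  let left := size - i_size * num
  (PySem.List.pyRange 0 num 1).foldl
    (fun p_sizes i =>
      let p_sizes := p_sizes ++ [i_size]
      if i < left then p_sizes.set i.toNat (PySem.List.pyGetD p_sizes i 0 + 1) else p_sizes)
    []

-- ===== PORT B =====
-- state = (p_sizes, remaining); k runs over range(num, 0, -1); -(-remaining // k) is Python's ceil division.
def allot_size_py_alt (size : Int) (num : Int) : List Int :=
  ((PySem.List.pyRange num 0 (-1)).foldl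
    (fun (st : List Int × Int) k =>
      let part := -(PySem.Int.floordiv (-st.2) k)
      (st.1 ++ [part], st.2 - part))
    ([], size)).1

-- ===== PRECONDITION & SPEC =====
-- Python A raises ZeroDivisionError exactly when num = 0.
def Pre_allot_size_py (size : Int) (num : Int) : Prop := num ≠ 0
instance (size : Int) (num : Int) : Decidable (Pre_allot_size_py size num) := by unfold Pre_allot_size_py; infer_instance
def pvWitness_allot_size_py : Int × Int := (7, 3)

def Spec_allot_size_py (size : Int) (num : Int) (out : List Int) : Prop := out = allot_size_py_alt size num
instance (size : Int) (num : Int) (out : List Int) : Decidable (Spec_allot_size_py size num out) := by unfold Spec_allot_size_py; infer_instance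

-- ===== CLAIM (what is proved, stated in full; the proofs are below) =====
def Claim_equal_allot_size_py : Prop := ∀ (size : Int) (num : Int), Dom_allot_size_py size num → Pre_allot_size_py size num → Spec_allot_size_py size num (allot_size_py size num)

-- ===== LEMMAS AND PROOFS =====

-- Invariant of A's loop: after processing range(n), the list is the two runs of lengths min n left and n - min n left.
theorem allot_loop (q left : Int) (n : Nat) (hl : 0 ≤ left) :
    (PySem.List.pyRange 0 (n : Int) 1).foldl
      (fun p_sizes i =>
        let p_sizes := p_sizes ++ [q]
        if i < left then p_sizes.set i.toNat (PySem.List.pyGetD p_sizes i 0 + 1) else p_sizes)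
      []
    = List.replicate (min n left.toNat) (q + 1) ++ List.replicate (n - min n left.toNat) q := by
  induction n with
  | zero => simp [PySem.List.pyRange_one_eq_nil]
  | succ n ih =>
    have hcast : ((n : Int) + 1) = ((n + 1 : Nat) : Int) := by push_cast; ring
    rw [← hcast, PySem.List.pyRange_one_succ_right (by positivity), List.foldl_append, ih]
    simp only [List.foldl_cons, List.foldl_nil]
    by_cases h : (n : Int) < left
    · have hn : n < left.toNat := by omega
      have hmin : min n left.toNat = n := by omega
      have hmin' : min (n + 1) left.toNat = n + 1 := by omega
      simp only [h, if_pos, hmin, hmin']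
      have hlen : (List.replicate n (q + 1) ++ List.replicate (n - n) q).length = n := by simp
      simp [PySem.List.pyGetD, List.replicate_succ' (n := n)]
    · have hle : left.toNat ≤ n := by omega
      have hmin : min n left.toNat = left.toNat := by omega
      have hmin' : min (n + 1) left.toNat = left.toNat := by omega
      simp only [h, if_neg, not_false_iff, hmin, hmin']
      rw [List.append_assoc]
      congr 1
      rw [← List.replicate_succ' (n := n - left.toNat)]
      congr 1
      omega

-- Python ceiling division -(-rem // m) for m > 0, with rem = q*m + L, 0 ≤ L < m.
theorem ceil_part (q L m : Int) (hm : 0 < m) (h0 : 0 ≤ L) (hL : L < m) :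
    -(PySem.Int.floordiv (-(q * m + L)) m) = if 0 < L then q + 1 else q := by
  rw [PySem.Int.floordiv_eq_ediv_of_pos hm]
  have h1 : -(q * m + L) = -L + -q * m := by ring
  rw [h1, Int.add_mul_ediv_right _ _ (by omega)]
  by_cases hpos : 0 < L
  · have h2 : -L = (m - L) + (-1) * m := by ring
    rw [h2, Int.add_mul_ediv_right _ _ (by omega),
        Int.ediv_eq_zero_of_lt (by omega) (by omega)]
    simp [hpos]
  · have hz : L = 0 := by omega
    simp [hz]

-- Invariant of B's greedy loop: over countdown n..1 with remaining = q*n + L (0 ≤ L < n),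
-- it appends L copies of q+1 then n-L copies of q.
theorem greedy_loop (n : Nat) (q L : Int) (acc : List Int) (h0 : 0 ≤ L) (hL : L < n) :
    ((PySem.List.pyRange (n : Int) 0 (-1)).foldl
      (fun (st : List Int × Int) k =>
        let part := -(PySem.Int.floordiv (-st.2) k)
        (st.1 ++ [part], st.2 - part))
      (acc, q * n + L)).1
    = acc ++ List.replicate L.toNat (q + 1) ++ List.replicate (n - L.toNat) q := by
  induction n generalizing q L acc with
  | zero => omega
  | succ n ih =>
    have hcast : ((n + 1 : Nat) : Int) = (n : Int) + 1 := by push_cast; ring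
    rw [hcast, PySem.List.pyRange_neg_one_cons (by positivity)]
    simp only [List.foldl_cons]
    rw [show (n : Int) + 1 - 1 = (n : Int) by ring]
    rw [ceil_part q L ((n : Int) + 1) (by positivity) h0 (by exact_mod_cast hL)]
    by_cases hpos : 0 < L
    · have hrem : q * ((n : Int) + 1) + L - (q + 1) = q * n + (L - 1) := by ring
      simp only [hpos, if_pos, hrem]
      rw [ih q (L - 1) (acc ++ [q + 1]) (by omega) (by push_cast at hL ⊢; omega)]
      have hLt : L.toNat = (L - 1).toNat + 1 := by omega
      rw [hLt, List.replicate_succ, Nat.succ_sub_succ]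
      simp
    · have hz : L = 0 := by omega
      subst hz
      simp only [hpos, if_neg, not_false_iff]
      have hrem : q * ((n : Int) + 1) + 0 - q = q * n + 0 := by ring
      rw [hrem]
      rcases Nat.eq_zero_or_pos n with hn0 | hn0
      · subst hn0
        rw [PySem.List.pyRange_neg_one_eq_nil (by norm_num)]
        simp
      · rw [ih q 0 (acc ++ [q]) le_rfl (by exact_mod_cast hn0)]
        have : List.replicate (n + 1 - (0 : Int).toNat) q
            = q :: List.replicate (n - (0 : Int).toNat) q := by
          simp [List.replicate_succ]
        simp [List.replicate_succ]

theorem allot_size_py_eq (size num : Int) (hnum : num ≠ 0) :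
    allot_size_py size num = allot_size_py_alt size num := by
  simp only [allot_size_py, allot_size_py_alt]
  rcases lt_or_gt_of_ne hnum with hneg | hpos
  · rw [PySem.List.pyRange_one_eq_nil (by omega),
        PySem.List.pyRange_neg_one_eq_nil (by omega)]
    simp
  · obtain ⟨n, rfl⟩ : ∃ n : Nat, num = (n : Int) := ⟨num.toNat, by omega⟩
    have hfe := PySem.Int.floordiv_eq_ediv_of_pos (a := size) hpos
    have hl0 : 0 ≤ size - PySem.Int.floordiv size (n : Int) * (n : Int) := by
      have := Int.emod_nonneg size (b := (n : Int)) (by omega)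
      have := Int.emod_add_mul_ediv size (n : Int)
      have hcm : size / (n : Int) * (n : Int) = (n : Int) * (size / (n : Int)) := mul_comm _ _
      rw [hfe]; omega
    have hln : size - PySem.Int.floordiv size (n : Int) * (n : Int) < (n : Int) := by
      have := Int.emod_lt_of_pos size hpos
      have := Int.emod_add_mul_ediv size (n : Int)
      have hcm : size / (n : Int) * (n : Int) = (n : Int) * (size / (n : Int)) := mul_comm _ _
      rw [hfe]; omega
    rw [allot_loop _ _ n hl0]
    have hsz : size = PySem.Int.floordiv size (n : Int) * (n : Int)
        + (size - PySem.Int.floordiv size (n : Int) * (n : Int)) := by ring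
    rw [show ((PySem.List.pyRange (n : Int) 0 (-1)).foldl
        (fun (st : List Int × Int) k =>
          let part := -(PySem.Int.floordiv (-st.2) k)
          (st.1 ++ [part], st.2 - part))
        ([], size)) = ((PySem.List.pyRange (n : Int) 0 (-1)).foldl
        (fun (st : List Int × Int) k =>
          let part := -(PySem.Int.floordiv (-st.2) k)
          (st.1 ++ [part], st.2 - part))
        ([], PySem.Int.floordiv size (n : Int) * (n : Int)
          + (size - PySem.Int.floordiv size (n : Int) * (n : Int)))) from by rw [← hsz]]
    rw [greedy_loop n _ _ [] hl0 hln]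
    generalize size - PySem.Int.floordiv size (n : Int) * (n : Int) = L at hl0 hln
    have hmin : min n L.toNat = L.toNat := by omega
    simp [hmin]

-- ===== VERDICT (by name: the statement is the Claim_ definition above) =====
theorem allot_size_py_spec : Claim_equal_allot_size_py := by
  intro size num _ hpre
  exact allot_size_py_eq size num hpre
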